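-- pv_equiv track=rewrite | github.com/idaten459/bf_transpiler | tinybf/transpiler.py | _is_clear_loop
-- ===== SOURCE A (Python) =====
-- def _is_clear_loop(body: str) -> bool:
--     if not body:
--         return False
--     pointer = 0
--     home_decrements = 0
--     home_increments = 0
--     for char in body:
--         if char == ">":
--             pointer += 1
--         elif char == "<":
--             pointer -= 1
--         elif char == "+":
--             if pointer == 0:
--                 home_increments += 1
--         elif char == "-":
--             if pointer == 0:
--                 home_decrements += 1
--         else:
--             return False
--     return pointer == 0 and home_decrements > 0 and home_increments == 0
-- ===== SOURCE B (Python) =====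
-- def _is_clear_loop(body: str) -> bool:
--     delta = {">": 1, "<": -1, "+": 0, "-": 0}
--     if not body or any(c not in delta for c in body):
--         return False
--     # positions[i] = pointer position BEFORE body[i]; positions[-1] = final position
--     positions = [0]
--     for c in body:
--         positions.append(positions[-1] + delta[c])
--     pairs = list(zip(body, positions))
--     plus_home = sum(1 for c, p in pairs if c == "+" and p == 0)
--     minus_home = sum(1 for c, p in pairs if c == "-" and p == 0)
--     return positions[-1] == 0 and plus_home == 0 and minus_home > 0
-- ===== Notes on version B (the rewrite author's own statement) =====
-- stated objective: alternative
-- what changed: A tracks pointer and home-cell counters inline in one stateful loop with early return; B first validates the alphabet, then materialises the pointer-position-before-each-op table as an explicit prefix-sum list from a char->delta dict, and counts home-cell '+' and '-' by filtering (char, position) pairs.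
import Mathlib
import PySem

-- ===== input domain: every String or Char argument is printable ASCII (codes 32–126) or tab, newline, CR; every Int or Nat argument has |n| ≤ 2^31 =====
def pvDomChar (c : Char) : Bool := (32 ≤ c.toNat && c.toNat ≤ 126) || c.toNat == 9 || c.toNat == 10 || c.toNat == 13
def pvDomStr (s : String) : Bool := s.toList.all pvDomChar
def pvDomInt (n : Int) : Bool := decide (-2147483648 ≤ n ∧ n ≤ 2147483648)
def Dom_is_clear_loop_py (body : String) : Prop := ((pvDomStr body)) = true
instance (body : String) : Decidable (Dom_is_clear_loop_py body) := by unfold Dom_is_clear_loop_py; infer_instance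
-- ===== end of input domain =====

-- B replaces A's single stateful loop by a validation pass, an explicit pointer-position
-- table, and two counting passes over (char, position-before) pairs: objective 'alternative'.

-- ===== PORT A =====
-- A's for-loop with early return, as structural recursion over the chars;
-- state = (pointer, home_decrements, home_increments).
def aLoop : List Char → Int → Int → Int → Bool
  | [], pointer, home_dec, home_inc =>
      decide (pointer = 0 ∧ home_dec > 0 ∧ home_inc = 0)
  | c :: rest, pointer, home_dec, home_inc =>
      if c = '>' then aLoop rest (pointer + 1) home_dec home_inc
      else if c = '<' then aLoop rest (pointer - 1) home_dec home_inc
      else if c = '+' then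
        aLoop rest pointer home_dec (if pointer = 0 then home_inc + 1 else home_inc)
      else if c = '-' then
        aLoop rest pointer (if pointer = 0 then home_dec + 1 else home_dec) home_inc
      else false

def is_clear_loop_py (body : String) : Bool :=
  if body.toList = [] then false
  else aLoop body.toList 0 0 0

-- ===== PORT B =====
def pvDelta : PySem.Dict Char Int := PySem.Dict.mk [('>', 1), ('<', -1), ('+', 0), ('-', 0)]

def is_clear_loop_py_alt (body : String) : Bool :=
  let cs := body.toList
  if cs = [] ∨ cs.any (fun c => (PySem.Dict.get? pvDelta c).isNone) then false
  else
    let positions := cs.foldl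
      (fun ps c => ps ++ [((PySem.List.pyGet? ps (-1)).getD 0) + ((PySem.Dict.get? pvDelta c).getD 0)])
      [0]
    let pairs := cs.zip positions
    let plus_home : Nat := pairs.countP (fun cp => cp.1 == '+' && cp.2 == 0)
    let minus_home : Nat := pairs.countP (fun cp => cp.1 == '-' && cp.2 == 0)
    ((PySem.List.pyGet? positions (-1)).getD 0 == 0) && plus_home == 0 && minus_home > 0

-- ===== PRECONDITION & SPEC =====
def Spec_is_clear_loop_py (body : String) (out : Bool) : Prop := out = is_clear_loop_py_alt body
instance (body : String) (out : Bool) : Decidable (Spec_is_clear_loop_py body out) := by unfold Spec_is_clear_loop_py; infer_instance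

-- ===== CLAIM (what is proved, stated in full; the proofs are below) =====
def Claim_equal_is_clear_loop_py : Prop := ∀ (body : String), Dom_is_clear_loop_py body → Spec_is_clear_loop_py body (is_clear_loop_py body)

-- ===== LEMMAS AND PROOFS =====

-- per-char pointer delta for valid chars
def dOf (c : Char) : Int := if c = '>' then 1 else if c = '<' then -1 else 0

def validC (c : Char) : Prop := c = '>' ∨ c = '<' ∨ c = '+' ∨ c = '-'

-- positions-before-each-char list, starting at p (length = cs.length + 1)
def scanPos (p : Int) : List Char → List Int
  | [] => [p]
  | c :: rest => p :: scanPos (p + dOf c) rest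

def netOf (cs : List Char) : Int := (cs.map dOf).sum

def homeCount (ch : Char) (cs : List Char) (p : Int) : Nat :=
  match cs with
  | [] => 0
  | c :: rest => (if c = ch ∧ p = 0 then 1 else 0) + homeCount ch rest (p + dOf c)

theorem scanPos_getLast? (p : Int) (cs : List Char) :
    (scanPos p cs).getLast? = some (p + netOf cs) := by
  induction cs generalizing p with
  | nil => simp [scanPos, netOf]
  | cons c rest ih =>
      have h := ih (p + dOf c)
      cases hsc : scanPos (p + dOf c) rest with
      | nil => simp [hsc] at h
      | cons y ys =>
          rw [hsc] at h
          simp only [scanPos, hsc, List.getLast?_cons_cons, h, netOf, List.map_cons,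
                     List.sum_cons]
          ring_nf

theorem scanPos_last (p : Int) (cs : List Char) :
    (PySem.List.pyGet? (scanPos p cs) (-1)).getD 0 = p + netOf cs := by
  rw [PySem.List.pyGet?_neg_one, scanPos_getLast?, Option.getD_some]

theorem get?_pvDelta_valid (c : Char) (h : validC c) :
    (PySem.Dict.get? pvDelta c).getD 0 = dOf c := by
  rcases h with h | h | h | h <;> subst h <;> decide

theorem get?_pvDelta_isNone (c : Char) :
    (PySem.Dict.get? pvDelta c).isNone = true ↔ ¬ validC c := by
  constructor
  · intro h hv
    rcases hv with e | e | e | e <;> subst e <;> simp [pvDelta, PySem.Dict.get?] at h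
  · intro h
    have h1 : c ≠ '>' := fun e => h (Or.inl e)
    have h2 : c ≠ '<' := fun e => h (Or.inr (Or.inl e))
    have h3 : c ≠ '+' := fun e => h (Or.inr (Or.inr (Or.inl e)))
    have h4 : c ≠ '-' := fun e => h (Or.inr (Or.inr (Or.inr e)))
    simp [pvDelta, PySem.Dict.get?, Ne.symm h1, Ne.symm h2, Ne.symm h3, Ne.symm h4]

-- B's positions foldl builds init ++ scanPos p cs when init ends in p and the chars are valid
theorem foldl_positions (cs : List Char) (init : List Int) (p : Int)
    (hv : ∀ c ∈ cs, validC c) :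
    cs.foldl
      (fun ps c => ps ++ [((PySem.List.pyGet? ps (-1)).getD 0) + ((PySem.Dict.get? pvDelta c).getD 0)])
      (init ++ [p]) = init ++ scanPos p cs := by
  induction cs generalizing init p with
  | nil => simp [scanPos]
  | cons c rest ih =>
      simp only [List.foldl_cons]
      rw [PySem.List.pyGet?_neg_one_append_singleton,
          get?_pvDelta_valid c (hv c (by simp))]
      have := ih (init ++ [p]) (p + dOf c) (fun c' hc' => hv c' (by simp [hc']))
      simp only [Option.getD_some, List.append_assoc] at this ⊢
      rw [this]
      simp [scanPos]

-- the counting pass over zip cs (scanPos p cs) is homeCount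
theorem countP_zip_scan (ch : Char) (cs : List Char) (p : Int) :
    (cs.zip (scanPos p cs)).countP (fun cp => cp.1 == ch && cp.2 == 0)
      = homeCount ch cs p := by
  induction cs generalizing p with
  | nil => simp [homeCount]
  | cons c rest ih =>
      simp only [scanPos, List.zip_cons_cons, List.countP_cons, homeCount, ih]
      by_cases h1 : c = ch <;> by_cases h2 : p = 0 <;>
        simp [h1, h2, Nat.add_comm]

-- A's loop on all-valid input, characterised
theorem aLoop_valid (cs : List Char) (p hd hi : Int)
    (hv : ∀ c ∈ cs, validC c) :
    aLoop cs p hd hi = true ↔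
      (p + netOf cs = 0 ∧ hd + (homeCount '-' cs p : Int) > 0
        ∧ hi + (homeCount '+' cs p : Int) = 0) := by
  induction cs generalizing p hd hi with
  | nil => simp [aLoop, netOf, homeCount]
  | cons c rest ih =>
      have hc := hv c (by simp)
      have hrest : ∀ c' ∈ rest, validC c' := fun c' hc' => hv c' (by simp [hc'])
      rcases hc with h | h | h | h <;> subst h <;>
        simp only [aLoop, Char.reduceEq, if_false, if_true] <;>
        rw [ih _ _ _ hrest] <;>
        simp only [netOf, homeCount, dOf, List.map_cons, List.sum_cons, Char.reduceEq,
                   reduceIte, false_and, true_and, if_false] <;>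
        (try simp only [show p - (1:Int) = p + -1 from by ring]) <;>
        by_cases hp : p = 0 <;> (try simp [hp]) <;> omega

-- A's loop returns False once any invalid char occurs (the else branch)
theorem aLoop_invalid (cs : List Char) (p hd hi : Int)
    (hv : ¬ ∀ c ∈ cs, validC c) :
    aLoop cs p hd hi = false := by
  induction cs generalizing p hd hi with
  | nil => exact absurd (by simp) hv
  | cons c rest ih =>
      by_cases hc : validC c
      · have hrest : ¬ ∀ c' ∈ rest, validC c' := by
          intro hall
          exact hv (by
            intro c' hc'
            rcases List.mem_cons.mp hc' with h | h
            · exact h ▸ hc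
            · exact hall c' h)
        rcases hc with h | h | h | h <;> subst h <;>
          simp [aLoop, ih _ _ _ hrest]
      · have h1 : c ≠ '>' := fun e => hc (Or.inl e)
        have h2 : c ≠ '<' := fun e => hc (Or.inr (Or.inl e))
        have h3 : c ≠ '+' := fun e => hc (Or.inr (Or.inr (Or.inl e)))
        have h4 : c ≠ '-' := fun e => hc (Or.inr (Or.inr (Or.inr e)))
        simp [aLoop, h1, h2, h3, h4]

-- ===== VERDICT (by name: the statement is the Claim_ definition above) =====
theorem is_clear_loop_py_spec : Claim_equal_is_clear_loop_py := by
  intro body _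
  unfold Spec_is_clear_loop_py is_clear_loop_py is_clear_loop_py_alt
  set cs := body.toList with hcs
  by_cases hnil : cs = []
  · simp [hnil]
  · by_cases hv : ∀ c ∈ cs, validC c
    · have hany : cs.any (fun c => (PySem.Dict.get? pvDelta c).isNone) = false := by
        simp only [List.any_eq_false]
        intro c hc
        simp only [get?_pvDelta_isNone, not_not]
        exact hv c hc
      simp only [hnil, hany, Bool.false_eq_true, or_self, if_neg, false_or,
                 not_false_iff]
      rw [show ([0] : List Int) = [] ++ [0] from rfl, foldl_positions cs [] 0 hv]
      simp only [List.nil_append]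
      rw [Bool.eq_iff_iff, aLoop_valid cs 0 0 0 hv]
      simp only [scanPos_last, countP_zip_scan, Bool.and_eq_true, beq_iff_eq,
                 decide_eq_true_eq, Int.zero_add, Int.add_zero]
      omega
    · have hex : ∃ c ∈ cs, ¬ validC c := by
        by_contra h; push Not at h; exact hv h
      rcases hex with ⟨c, hc, hcv⟩
      have hany : cs.any (fun c => (PySem.Dict.get? pvDelta c).isNone) = true := by
        simp only [List.any_eq_true]
        exact ⟨c, hc, (get?_pvDelta_isNone c).mpr hcv⟩
      simp [hnil, hany, aLoop_invalid cs 0 0 0 hv]
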